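-- pv_equiv track=rewrite | github.com/ad3002/v16trim | reads_to_merged.py | get_poses
-- ===== SOURCE A (Python) =====
-- def hamming_distance(s1, s2):
--     return sum(i != j for i, j in zip(s1,s2) if i != 'N' and j != 'N')
--
-- def get_poses(seq, primer):
--     '''
--     '''
--     found = []
--     hd_ = 100000
--     for i in range(0, len(seq)-len(primer)+1):
--         substring = seq[i:i+len(primer)]
--         hd = hamming_distance(primer, substring)
--         if hd < hd_:
--             found = [i]
--             hd_ = hd
--         elif hd == hd_:
--             found.append(i)
--     return tuple(found), hd_
-- ===== SOURCE B (Python) =====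
-- def get_poses(seq, primer):
--     # Inverted-index / sparse-convolution scheme: instead of sliding the primer and
--     # comparing it to each window, index the primer's positions by character, then make
--     # one pass over seq scattering match/N credits into a per-offset mismatch table.
--     m = len(primer)
--     L = len(seq) - m + 1
--     pos = {}
--     valid_js = []
--     for j, c in enumerate(primer):
--         if c != 'N':
--             pos.setdefault(c, []).append(j)
--             valid_js.append(j)
--     mism = [len(valid_js)] * max(L, 0)
--     for p, c in enumerate(seq):
--         for j in (valid_js if c == 'N' else pos.get(c, [])):
--             i = p - j
--             if 0 <= i < L:
--                 mism[i] -= 1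
--     best = min([100000] + mism)
--     return tuple(i for i, h in enumerate(mism) if h == best), best
-- ===== Notes on version B (the rewrite author's own statement) =====
-- stated objective: alternative
-- what changed: B never slides the primer over the text: it builds an inverted index of the primer's non-'N' positions per character, makes one scatter pass over seq subtracting match/N credits from a per-offset mismatch table, then takes the min and the offsets attaining it.
import Mathlib
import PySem

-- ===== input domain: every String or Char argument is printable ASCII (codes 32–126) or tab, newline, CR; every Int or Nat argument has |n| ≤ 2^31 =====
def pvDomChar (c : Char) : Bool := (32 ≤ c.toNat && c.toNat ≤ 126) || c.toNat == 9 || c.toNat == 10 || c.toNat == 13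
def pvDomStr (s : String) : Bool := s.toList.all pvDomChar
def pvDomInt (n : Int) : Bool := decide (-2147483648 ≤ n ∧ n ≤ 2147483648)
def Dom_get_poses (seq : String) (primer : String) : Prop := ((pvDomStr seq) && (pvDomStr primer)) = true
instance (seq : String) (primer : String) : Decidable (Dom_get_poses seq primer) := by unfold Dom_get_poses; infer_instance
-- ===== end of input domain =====

-- B replaces A's slide-and-compare loop by an inverted index of the primer's positions per
-- character and one scatter pass over seq into a per-offset mismatch table (alternative
-- algorithm, same worst-case cost).

-- ===== PORT A =====
-- helper hamming_distance: sum(i != j for i, j in zip(s1, s2) if i != 'N' and j != 'N')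
def hamming_distance (s1 : String) (s2 : String) : Int :=
  (((s1.toList.zip s2.toList).filter (fun p => p.1 != 'N' && p.2 != 'N')).map
    (fun p => if p.1 != p.2 then (1 : Int) else 0)).sum
def get_poses (seq : String) (primer : String) : List Int × Int :=
  (PySem.List.pyRange 0 (PySem.Str.len seq - PySem.Str.len primer + 1) 1).foldl
    (fun st i =>
      let substring := PySem.Str.slice seq (some i) (some (i + PySem.Str.len primer))
      let hd := hamming_distance primer substring
      if hd < st.2 then ([i], hd)
      else if hd = st.2 then (st.1 ++ [i], st.2)
      else st)
    ([], 100000)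

-- ===== PORT B =====
-- helper for 'if 0 <= i < L: mism[i] -= 1'
def pvDec (L : Int) (ms : List Int) (k : Int) : List Int :=
  if 0 ≤ k ∧ k < L then ms.modify k.toNat (· - 1) else ms
def get_poses_alt (seq : String) (primer : String) : List Int × Int :=
  let m := PySem.Str.len primer
  let L := PySem.Str.len seq - m + 1
  let st := (PySem.List.enumerate primer.toList 0).foldl
    (fun (st : PySem.Dict Char (List Int) × List Int) jc =>
      if jc.2 != 'N' then
        (st.1.modify jc.2 [] (· ++ [jc.1]), st.2 ++ [jc.1])
      else st)
    (PySem.Dict.empty, [])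
  let mism := (PySem.List.enumerate seq.toList 0).foldl
    (fun ms pc =>
      (if pc.2 == 'N' then st.2 else st.1.getD pc.2 []).foldl
        (fun a j => pvDec L a (pc.1 - j)) ms)
    (List.replicate (max L 0).toNat (st.2.length : Int))
  let best := (PySem.List.min? ((100000 : Int) :: mism) (fun x => x)).getD 100000
  (((PySem.List.enumerate mism 0).filter (fun p => p.2 == best)).map (fun p => p.1), best)

-- ===== PRECONDITION & SPEC =====
def Spec_get_poses (seq : String) (primer : String) (out : List Int × Int) : Prop := out = get_poses_alt seq primer
instance (seq : String) (primer : String) (out : List Int × Int) : Decidable (Spec_get_poses seq primer out) := by unfold Spec_get_poses; infer_instance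

-- ===== CLAIM (what is proved, stated in full; the proofs are below) =====
def Claim_equal_get_poses : Prop := ∀ (seq : String) (primer : String), Dom_get_poses seq primer → Spec_get_poses seq primer (get_poses seq primer)

-- ===== LEMMAS AND PROOFS =====

-- proof-side views of B's index structures
def pvF (pr : List Char) : List (Int × Char) :=
  (PySem.List.enumerate pr 0).filter (fun jc => jc.2 != 'N')

def pvJs (pr : List Char) (c : Char) : List Int :=
  if c == 'N' then (pvF pr).map (·.1) else ((pvF pr).filter (fun jc => jc.2 == c)).map (·.1)

def pvK (pr s : List Char) : List Int :=
  (PySem.List.enumerate s 0).flatMap (fun pc => (pvJs pr pc.2).map (fun j => pc.1 - j))-- does seq position i+j exist and fail to count as a mismatch against c = primer[j]?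
def pvHit (s : List Char) (i : Int) (c : Char) (j : Nat) : Bool :=
  match s[(i + (j : Int)).toNat]? with
  | some d => d == 'N' || d == c
  | none => false

def pvCond (pr s : List Char) (i : Int) (j : Nat) : Bool :=
  (pr[j]! != 'N') && pvHit s i (pr[j]!) j

theorem countP_split {α : Type} (l : List α) (p q : α → Bool) :
    l.countP p = l.countP (fun x => p x && q x) + l.countP (fun x => p x && !q x) := by
  induction l with
  | nil => simp
  | cons a t ih =>
    simp only [List.countP_cons, ih]
    by_cases hp : p a <;> by_cases hq : q a <;> simp [hp, hq] <;> omega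

theorem countP_enumerate_range (l : List Char) (t : Int) (q : Int × Char → Bool) :
    (PySem.List.enumerate l t).countP q
      = (List.range l.length).countP (fun (j : Nat) => q (t + (j : Int), l[j]!)) := by
  induction l generalizing t with
  | nil => simp [PySem.List.enumerate_nil]
  | cons x xs ih =>
    rw [PySem.List.enumerate_cons, List.countP_cons, ih (t+1)]
    rw [List.length_cons, List.range_succ_eq_map, List.countP_cons, List.countP_map]
    have : ((fun (j : Nat) => q (t + (j : Int), (x :: xs)[j]!)) ∘ Nat.succ)
        = (fun (j : Nat) => q (t + 1 + (j : Int), xs[j]!)) := by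
      funext j
      simp [Function.comp]
      congr 2
      omega
    rw [this]
    simp

theorem countP_range_pin (m : Nat) (t : Int) (p : Nat → Bool) :
    (List.range m).countP (fun (j : Nat) => ((j : Int) == t) && p j)
      = if 0 ≤ t ∧ t.toNat < m ∧ p t.toNat then 1 else 0 := by
  induction m with
  | zero => simp
  | succ n ih =>
    rw [List.range_succ, List.countP_append, ih]
    by_cases hm : ((n : Int) = t)
    · have h1 : t.toNat = n := by omega
      have h2 : ¬ (t.toNat < n) := by omega
      by_cases hp : p n <;> simp [hm, hp, h1] <;> omega
    · have : (((n : Int) == t) && p n) = false := by simp [hm]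
      simp only [List.countP_cons, List.countP_nil, this]
      by_cases h0 : 0 ≤ t
      · have : t.toNat < n ↔ t.toNat < n + 1 := by omega
        simp [this]
      · simp [h0]
theorem countP_range_update (m k : Nat) (q q' : Nat → Bool)
    (hk : ∀ j, j ≠ k → q' j = q j) (hq : k < m → q k = false) :
    (List.range m).countP q' = (List.range m).countP q + (if k < m ∧ q' k then 1 else 0) := by
  induction m with
  | zero => simp
  | succ n ih =>
    rw [List.range_succ, List.countP_append, List.countP_append]
    by_cases hnk : n = k
    · subst hnk
      have hqn : q n = false := hq (by omega)
      have : ∀ j, j < n → ¬ (j = n) := by omega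
      have heq : (List.range n).countP q' = (List.range n).countP q := by
        apply List.countP_congr
        intro j hj
        rw [hk j (by simp at hj; omega)]
      rw [heq]
      by_cases hq' : q' n <;> simp [hq', hqn] <;> omega
    · have hqq : q' n = q n := hk n hnk
      rw [ih (fun h => hq (by omega))]
      have : k < n ↔ k < n + 1 := by omega
      simp [hqq, this]
      omega
theorem countP_zip_range (q : Char → Char → Bool) :
    ∀ (pr w : List Char), pr.length ≤ w.length →
    (pr.zip w).countP (fun p => q p.1 p.2)
      = (List.range pr.length).countP (fun j => q pr[j]! w[j]!) := by
  intro pr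
  induction pr with
  | nil => simp
  | cons x xs ih =>
    intro w hw
    cases w with
    | nil => simp at hw
    | cons y ys =>
      simp only [List.zip_cons_cons, List.countP_cons, List.length_cons,
        List.range_succ_eq_map, List.countP_map]
      rw [ih ys (by simpa using hw)]
      have : ((fun j => q (x :: xs)[j]! (y :: ys)[j]!) ∘ Nat.succ)
          = (fun (j : Nat) => q xs[j]! ys[j]!) := by
        funext j; simp [Function.comp]
      rw [this]
      simp

theorem foldK_length (L : Int) (K : List Int) (ms : List Int) :
    (K.foldl (pvDec L) ms).length = ms.length := by
  induction K generalizing ms with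
  | nil => rfl
  | cons k t ih =>
    rw [List.foldl_cons, ih]
    unfold pvDec
    split
    · exact List.length_modify _ _ _
    · rfl
theorem foldK_getElem? (L : Int) (K : List Int) (ms : List Int) (i : Nat)
    (hi : i < ms.length) (hiL : (i : Int) < L) :
    (K.foldl (pvDec L) ms)[i]?
      = some (ms[i] - (K.count (i : Int) : Int)) := by
  induction K generalizing ms with
  | nil => simp [List.getElem?_eq_getElem hi]
  | cons k t ih =>
    rw [List.foldl_cons]
    have hlen : (pvDec L ms k).length = ms.length := by
      unfold pvDec; split <;> simp [List.length_modify]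
    have hstep : (pvDec L ms k)[i]'(by omega) = ms[i] - (if k == (i : Int) then 1 else 0) := by
      unfold pvDec
      split
      · rename_i h
        rw [List.getElem_modify]
        by_cases hk : k.toNat = i
        · have : (k == (i : Int)) = true := by simp; omega
          simp [hk, this]
        · have : (k == (i : Int)) = false := by simp; omega
          simp [hk, this]
      · rename_i h
        have : (k == (i : Int)) = false := by simp; omega
        simp [this]
    rw [ih (pvDec L ms k) (by omega)]
    rw [hstep, List.count_cons]
    congr 1
    push_cast
    ring

-- count of i among the decrement targets contributed by one seq position (p, c)
theorem pvJs_count (pr : List Char) (c : Char) (p i : Int) :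
    ((pvJs pr c).map (fun j => p - j)).count i
      = if 0 ≤ p - i ∧ (p - i).toNat < pr.length ∧
            ((pr[(p - i).toNat]! != 'N') && (c == 'N' || c == pr[(p - i).toNat]!)) = true
        then 1 else 0 := by
  have hcnt : ∀ (l : List Int), (l.map (fun j => p - j)).count i = l.countP (fun j => (j : Int) == p - i) := by
    intro l
    rw [List.count_eq_countP, List.countP_map]
    apply List.countP_congr
    intro j _
    simp [Function.comp, beq_iff_eq]
    omega
  by_cases hc : c == 'N'
  · simp only [pvJs, hc, if_true]
    rw [hcnt, List.countP_map]
    show (pvF pr).countP (fun jc => jc.1 == p - i) = _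
    rw [pvF, List.countP_filter, countP_enumerate_range]
    have : (fun (j : Nat) => ((0 + (j : Int) == p - i) && (pr[j]! != 'N')))
        = (fun (j : Nat) => (((j : Int)) == p - i) && (pr[j]! != 'N')) := by
      funext j; norm_num
    rw [this, countP_range_pin]
    simp only [Bool.true_or, Bool.and_true]
  · simp only [pvJs, hc, Bool.false_eq_true, if_false]
    rw [hcnt, List.countP_map]
    show (((pvF pr).filter (fun jc => jc.2 == c))).countP (fun jc => jc.1 == p - i) = _
    rw [List.countP_filter, pvF, List.countP_filter, countP_enumerate_range]
    have : (fun (j : Nat) => (((0 + (j : Int) == p - i) && (pr[j]! == c)) && (pr[j]! != 'N')))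
        = (fun (j : Nat) => (((j : Int)) == p - i) && ((pr[j]! != 'N') && (c == pr[j]!))) := by
      funext j
      have hcc : (c == pr[j]!) = (pr[j]! == c) := by
        by_cases h : c = pr[j]! <;> simp [h, eq_comm]
      rw [hcc]
      simp [Bool.and_comm, Bool.and_left_comm]
    rw [this, countP_range_pin]
    simp only [Bool.false_or]
-- the scatter multiset: how many decrements land on offset i
theorem pvK_count (pr : List Char) (i : Int) (hi : 0 ≤ i) (s : List Char) :
    (pvK pr s).count i = (List.range pr.length).countP (pvCond pr s i) := by
  induction s using List.reverseRecOn with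
  | nil =>
    simp only [pvK, PySem.List.enumerate_nil, List.flatMap_nil, List.count_nil]
    refine (List.countP_eq_zero.mpr ?_).symm
    intro j _
    simp [pvCond, pvHit]
  | append_singleton s c ih =>
    rw [pvK, PySem.List.enumerate_append, List.flatMap_append, List.count_append]
    rw [show (PySem.List.enumerate s 0).flatMap (fun pc => (pvJs pr pc.2).map (fun j => pc.1 - j)) = pvK pr s from rfl]
    rw [ih]
    have henum1 : PySem.List.enumerate [c] (0 + (s.length : Int)) = [(((s.length : Int)), c)] := by
      simp [PySem.List.enumerate_cons, PySem.List.enumerate_nil]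
    rw [henum1]
    simp only [List.flatMap_cons, List.flatMap_nil, List.append_nil]
    rw [pvJs_count]
    set n := s.length with hdefn
    by_cases h0 : 0 ≤ (n : Int) - i
    · set k := ((n : Int) - i).toNat with hdefk
      have hik : i + (k : Int) = n := by omega
      have hq' : ∀ j : Nat, j ≠ k → pvCond pr (s ++ [c]) i j = pvCond pr s i j := by
        intro j hj
        have hne : (i + (j : Int)).toNat ≠ n := by omega
        unfold pvCond pvHit
        congr 1
        by_cases hlt : (i + (j : Int)).toNat < n
        · rw [List.getElem?_append_left hlt]
        · have h1 : (s ++ [c])[(i + (j : Int)).toNat]? = none := by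
            apply List.getElem?_eq_none
            simp
            omega
          have h2 : s[(i + (j : Int)).toNat]? = none := by
            apply List.getElem?_eq_none
            omega
          rw [h1, h2]
      have hq0 : k < pr.length → pvCond pr s i k = false := by
        intro _
        unfold pvCond pvHit
        have : s[(i + (k : Int)).toNat]? = none := by
          apply List.getElem?_eq_none
          omega
        rw [this]
        simp
      rw [countP_range_update pr.length k (pvCond pr s i) (pvCond pr (s ++ [c]) i) hq' hq0]
      congr 1
      have hget : (s ++ [c])[(i + (k : Int)).toNat]? = some c := by
        have h5 : (i + (k : Int)).toNat = s.length := by omega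
        rw [h5]
        exact List.getElem?_concat_length
      have hcnd : pvCond pr (s ++ [c]) i k = ((pr[k]! != 'N') && (c == 'N' || c == pr[k]!)) := by
        unfold pvCond pvHit
        rw [hget]
      have hiff : (0 ≤ (n : Int) - i ∧ ((n : Int) - i).toNat < pr.length ∧
            ((pr[((n : Int) - i).toNat]! != 'N') && (c == 'N' || c == pr[((n : Int) - i).toNat]!)) = true)
          ↔ (k < pr.length ∧ pvCond pr (s ++ [c]) i k = true) := by
        rw [hcnd, ← hdefk]
        constructor
        · rintro ⟨_, h2, h3⟩
          exact ⟨h2, h3⟩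
        · rintro ⟨h2, h3⟩
          exact ⟨h0, h2, h3⟩
      exact if_congr hiff rfl rfl
    · have hq' : ∀ j : Nat, pvCond pr (s ++ [c]) i j = pvCond pr s i j := by
        intro j
        unfold pvCond pvHit
        congr 1
        have h1 : (s ++ [c])[(i + (j : Int)).toNat]? = none := by
          apply List.getElem?_eq_none
          simp
          omega
        have h2 : s[(i + (j : Int)).toNat]? = none := by
          apply List.getElem?_eq_none
          omega
        rw [h1, h2]
      have hcc : List.countP (pvCond pr (s ++ [c]) i) (List.range pr.length)
          = List.countP (pvCond pr s i) (List.range pr.length) :=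
        List.countP_congr (fun j _ => by rw [hq' j])
      rw [if_neg (by omega), hcc]
      omega
-- the per-offset value: valid positions minus scatter hits = masked Hamming distance
theorem value_eq (seq primer : String) (i : Nat)
    (him : i + primer.toList.length ≤ seq.toList.length) :
    (((pvF primer.toList).length : Int))
      - ((List.range primer.toList.length).countP (pvCond primer.toList seq.toList (i : Int)) : Int)
    = hamming_distance primer (PySem.Str.slice seq (some (i : Int)) (some ((i : Int) + PySem.Str.len primer))) := by
  set s := seq.toList with hs
  set pr := primer.toList with hpr
  set m := pr.length with hm
  -- the substring is take m (drop i s)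
  have hw : (PySem.Str.slice seq (some (i : Int)) (some ((i : Int) + PySem.Str.len primer))).toList
      = (s.drop i).take m := by
    rw [PySem.Str.toList_slice, PySem.Chars.slice_eq_listSlice]
    have h1 : ((i : Int) + PySem.Str.len primer) = ((i + m : Nat) : Int) := by
      rw [PySem.Str.len_eq, ← hpr, ← hm]; push_cast; ring
    rw [h1, PySem.List.slice_natCast]
    congr 1
    omega
  set w := (s.drop i).take m with hwdef
  have hwlen : w.length = m := by
    simp [hwdef]
    omega
  -- hamming distance as a countP over range m
  have hham : hamming_distance primer (PySem.Str.slice seq (some (i : Int)) (some ((i : Int) + PySem.Str.len primer)))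
      = ((List.range m).countP (fun j => (pr[j]! != w[j]!) && (pr[j]! != 'N' && w[j]! != 'N')) : Int) := by
    unfold hamming_distance
    rw [show (PySem.Str.slice seq (some (i : Int)) (some ((i : Int) + PySem.Str.len primer))).toList = w from hw]
    rw [PySem.List.sum_map_ite_one_zero, List.countP_filter, ← hpr,
      countP_zip_range (fun a b => (a != b) && (a != 'N' && b != 'N')) pr w (by omega)]
  rw [hham]
  -- valid count as a countP over range m
  have hvalid : (pvF pr).length = (List.range m).countP (fun j => pr[j]! != 'N') := by
    rw [pvF, ← List.countP_eq_length_filter, countP_enumerate_range]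
  -- split valid into hit / non-hit
  have hsplit := countP_split (List.range m) (fun j => pr[j]! != 'N') (fun j => pvHit s (i : Int) (pr[j]!) j)
  have hcondeq : (List.range m).countP (fun j => (pr[j]! != 'N') && pvHit s (i : Int) (pr[j]!) j)
      = (List.range m).countP (pvCond pr s (i : Int)) := rfl
  -- pointwise: non-hit = mismatch
  have hpoint : (List.range m).countP (fun j => (pr[j]! != 'N') && !(pvHit s (i : Int) (pr[j]!) j))
      = (List.range m).countP (fun j => (pr[j]! != w[j]!) && (pr[j]! != 'N' && w[j]! != 'N')) := by
    apply List.countP_congr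
    intro j hj
    have hjm : j < m := by simpa using hj
    have hidx : ((i : Int) + (j : Int)).toNat = i + j := by omega
    have hsome : s[(i + j : Nat)]? = some (s[(i + j : Nat)]'(by omega)) :=
      List.getElem?_eq_getElem (by omega)
    have hwj : w[j]! = s[(i + j : Nat)]'(by omega) := by
      rw [List.getElem!_eq_getElem?_getD, hwdef]
      rw [List.getElem?_take_of_lt hjm, List.getElem?_drop, hsome]
      rfl
    have hhit : pvHit s (i : Int) (pr[j]!) j = ((w[j]! == 'N') || (w[j]! == pr[j]!)) := by
      unfold pvHit
      rw [hidx, hsome, hwj]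
    have boollem : ∀ a b : Char, ((a != 'N') && !((b == 'N') || (b == a)))
        = ((a != b) && (a != 'N' && b != 'N')) := by
      intro a b
      by_cases h3 : a = b
      · subst h3
        by_cases h1 : a = 'N'
        · subst h1; simp
        · have e : (a == 'N') = false := by simp [h1]
          simp [bne, e]
      · have e3 : (a == b) = false := by simp [h3]
        have e4 : (b == a) = false := by
          have : ¬ b = a := fun h => h3 h.symm
          simp [this]
        by_cases h1 : a = 'N'
        · subst h1
          simp [bne, e3]
        · have e1 : (a == 'N') = false := by simp [h1]
          by_cases h2 : b = 'N'
          · subst h2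
            simp [bne, e1, e3, e4]
          · have e2 : (b == 'N') = false := by simp [h2]
            simp [bne, e1, e2, e3, e4]
    rw [hhit, boollem pr[j]! w[j]!]
  rw [hvalid]
  rw [hcondeq] at hsplit
  rw [hpoint] at hsplit
  omega
-- the mismatch table equals the per-offset masked Hamming distances
theorem mism_eq_hds (seq primer : String) :
    (PySem.List.enumerate seq.toList 0).foldl
      (fun ms pc =>
        (pvJs primer.toList pc.2).foldl
          (fun a j => pvDec (PySem.Str.len seq - PySem.Str.len primer + 1) a (pc.1 - j)) ms)
      (List.replicate (max (PySem.Str.len seq - PySem.Str.len primer + 1) 0).toNat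
        ((pvF primer.toList).length : Int))
      = (PySem.List.pyRange 0 (PySem.Str.len seq - PySem.Str.len primer + 1) 1).map
          (fun i => hamming_distance primer
            (PySem.Str.slice seq (some i) (some (i + PySem.Str.len primer)))) := by
  set s := seq.toList with hs
  set pr := primer.toList with hpr
  set L := PySem.Str.len seq - PySem.Str.len primer + 1 with hLdef
  set f : Int → Int := fun i => hamming_distance primer
      (PySem.Str.slice seq (some i) (some (i + PySem.Str.len primer))) with hf
  have hLval : L = (s.length : Int) - (pr.length : Int) + 1 := by
    rw [hLdef, PySem.Str.len_eq, PySem.Str.len_eq, hs, hpr]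
  have hA : (PySem.List.enumerate s 0).foldl
      (fun ms pc => (pvJs pr pc.2).foldl (fun a j => pvDec L a (pc.1 - j)) ms)
      (List.replicate (max L 0).toNat ((pvF pr).length : Int))
      = (pvK pr s).foldl (pvDec L)
          (List.replicate (max L 0).toNat ((pvF pr).length : Int)) := by
    rw [pvK, List.foldl_flatMap]
    apply PySem.List.foldl_congr_mem
    intro acc pc _
    rw [List.foldl_map]
  rw [hA]
  by_cases hLpos : 0 ≤ L
  · have hcast : L = ((L.toNat : Nat) : Int) := by omega
    have hR : (PySem.List.pyRange 0 L 1).map f = (List.range L.toNat).map (fun (k : Nat) => f (k : Int)) := by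
      conv_lhs => rw [hcast]
      rw [PySem.List.pyRange_zero_natCast, List.map_map]
      simp [Function.comp]
    rw [hR]
    have hmax : (max L 0).toNat = L.toNat := by omega
    apply List.ext_getElem
    · rw [foldK_length, List.length_replicate, List.length_map, List.length_range, hmax]
    · intro i hi1 hi2
      have hiL : i < L.toNat := by
        simpa using hi2
      have hilen : i < (List.replicate (max L 0).toNat ((pvF pr).length : Int)).length := by
        rw [List.length_replicate]; omega
      have hval := foldK_getElem? L (pvK pr s) (List.replicate (max L 0).toNat ((pvF pr).length : Int)) i hilen (by omega)
      rw [List.getElem?_eq_getElem hi1] at hval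
      have hval' := Option.some.inj hval
      rw [hval', List.getElem_replicate, pvK_count pr (i : Int) (by positivity) s]
      have him : i + pr.length ≤ s.length := by omega
      have hv := value_eq seq primer i (by rw [← hs, ← hpr]; exact him)
      rw [← hpr, ← hs] at hv
      rw [hv]
      simp [hf]
  · have hnil1 : (PySem.List.pyRange 0 L 1) = [] := PySem.List.pyRange_one_eq_nil (by omega)
    have hnil2 : (max L 0).toNat = 0 := by omega
    rw [hnil1, hnil2]
    simp only [List.replicate_zero, List.map_nil]
    apply List.eq_nil_of_length_eq_zero
    rw [foldK_length]
    rfl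
-- B's first fold = (positions grouped per char, list of valid positions)
theorem pvIndex_eq (pr : List Char) :
    (PySem.List.enumerate pr 0).foldl
      (fun (st : PySem.Dict Char (List Int) × List Int) jc =>
        if jc.2 != 'N' then
          (st.1.modify jc.2 [] (· ++ [jc.1]), st.2 ++ [jc.1])
        else st)
      (PySem.Dict.empty, []) =
    ((pvF pr).foldl (fun d jc => d.modify jc.2 [] (· ++ [jc.1])) PySem.Dict.empty,
     (pvF pr).map (·.1)) := by
  rw [PySem.List.foldl_if_eq_foldl_filter]
  have h2 := PySem.List.foldl_prod_mk
      (fun (d : PySem.Dict Char (List Int)) (jc : Int × Char) => d.modify jc.2 [] (· ++ [jc.1]))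
      (fun (v : List Int) (jc : Int × Char) => v ++ [jc.1]) (pvF pr) PySem.Dict.empty []
  rw [PySem.List.foldl_append_singleton_eq_map] at h2
  simp only [List.nil_append] at h2
  exact h2
theorem pvIndex_getD (pr : List Char) (c : Char) :
    ((pvF pr).foldl (fun d jc => d.modify jc.2 [] (· ++ [jc.1])) PySem.Dict.empty).getD c []
      = ((pvF pr).filter (fun jc => jc.2 == c)).map (·.1) := by
  have h := PySem.Dict.getD_foldl_modify_append
      ((pvF pr).map (fun jc => (jc.2, jc.1))) PySem.Dict.empty c
  rw [List.foldl_map] at h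
  simp only [List.filter_map, List.map_map] at h
  simpa using h
theorem pvJs_fold (pr : List Char) (c : Char) :
    (if c == 'N' then (pvF pr).map (·.1)
     else ((pvF pr).foldl (fun d jc => d.modify jc.2 [] (· ++ [jc.1])) PySem.Dict.empty).getD c [])
    = pvJs pr c := by
  rw [pvIndex_getD, pvJs]
-- A's tracking loop over (offset, distance) pairs equals min-then-filter, for any start state.
theorem trackLoop_eq (ps : List (Int × Int)) (f0 : List Int) (b0 : Int) :
    ps.foldl
      (fun st p => if p.2 < st.2 then ([p.1], p.2)
                   else if p.2 = st.2 then (st.1 ++ [p.1], st.2) else st) (f0, b0)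
    = ((if (ps.map Prod.snd).foldl min b0 = b0 then f0 else []) ++
        (ps.filter (fun p => p.2 == (ps.map Prod.snd).foldl min b0)).map Prod.fst,
       (ps.map Prod.snd).foldl min b0) := by
  induction ps generalizing f0 b0 with
  | nil => simp
  | cons p t ih =>
    have hle := (PySem.List.foldl_min_le (t.map Prod.snd) (min b0 p.2)).1
    simp only [List.foldl_cons, List.map_cons, List.filter_cons]
    rcases lt_trichotomy p.2 b0 with h | h | h
    · rw [if_pos h, ih]
      have hmin : min b0 p.2 = p.2 := min_eq_right h.le
      rw [hmin] at hle
      simp only [hmin]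
      have hne : (t.map Prod.snd).foldl min p.2 ≠ b0 := by omega
      by_cases hb : (t.map Prod.snd).foldl min p.2 = p.2
      · simp [hb]
        intro hc
        exact absurd hc (by omega)
      · have : (p.2 == (t.map Prod.snd).foldl min p.2) = false := by
          simp; omega
        simp [hne, this, hb]
    · rw [if_neg (by omega), if_pos h, ih]
      have hmin : min b0 p.2 = b0 := min_eq_left h.ge
      rw [hmin] at hle
      simp only [hmin]
      by_cases hb : (t.map Prod.snd).foldl min b0 = b0
      · simp [hb, h]
      · have : (p.2 == (t.map Prod.snd).foldl min b0) = false := by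
          simp; omega
        simp [hb, this]
    · rw [if_neg (by omega), if_neg (by omega), ih]
      have hmin : min b0 p.2 = b0 := min_eq_left h.le
      rw [hmin] at hle
      simp only [hmin]
      have : (p.2 == (t.map Prod.snd).foldl min b0) = false := by
        simp; omega
      simp [this]
-- enumerate of a list mapped over range(a, b) recovers the (index, value) pairs.
theorem enumerate_map_pyRange (f : Int → Int) (b : Int) :
    ∀ (a : Int), PySem.List.enumerate ((PySem.List.pyRange a b 1).map f) a
      = (PySem.List.pyRange a b 1).map (fun i => (i, f i)) := by
  have key : ∀ (n : Nat) (a : Int), (b - a).toNat = n →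
      PySem.List.enumerate ((PySem.List.pyRange a b 1).map f) a
        = (PySem.List.pyRange a b 1).map (fun i => (i, f i)) := by
    intro n
    induction n with
    | zero =>
      intro a h
      rw [PySem.List.pyRange_one_eq_nil (by omega)]
      simp [PySem.List.enumerate_nil]
    | succ k ih =>
      intro a h
      rw [PySem.List.pyRange_one_cons (by omega)]
      simp only [List.map_cons, PySem.List.enumerate_cons]
      rw [ih (a + 1) (by omega)]
  intro a
  exact key (b - a).toNat a rfl
theorem get_poses_eq_alt (seq primer : String) : get_poses seq primer = get_poses_alt seq primer := by
  unfold get_poses get_poses_alt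
  rw [pvIndex_eq]
  simp only [pvJs_fold, List.length_map]
  rw [mism_eq_hds]
  set m := PySem.Str.len primer with hm
  set f : Int → Int := fun i => hamming_distance primer (PySem.Str.slice seq (some i) (some (i + m))) with hf
  set r := PySem.List.pyRange 0 (PySem.Str.len seq - m + 1) 1 with hr
  have hbest : (PySem.List.min? (100000 :: r.map f) (fun x => x)).getD 100000
      = (r.map f).foldl min 100000 := by
    rw [PySem.List.min?_id_cons]; rfl
  rw [hbest, enumerate_map_pyRange f (PySem.Str.len seq - m + 1) 0, ← hr]
  have hA : r.foldl
      (fun st i =>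
        let substring := PySem.Str.slice seq (some i) (some (i + m))
        let hd := hamming_distance primer substring
        if hd < st.2 then ([i], hd)
        else if hd = st.2 then (st.1 ++ [i], st.2) else st)
      (([] : List Int), (100000 : Int))
      = (r.map (fun i => (i, f i))).foldl
          (fun st p => if p.2 < st.2 then ([p.1], p.2)
                       else if p.2 = st.2 then (st.1 ++ [p.1], st.2) else st)
          (([] : List Int), (100000 : Int)) := by
    rw [List.foldl_map]
  rw [hA, trackLoop_eq]
  have hsnd : (r.map (fun i => (i, f i))).map Prod.snd = r.map f := by
    rw [List.map_map]; rfl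
  rw [hsnd, List.filter_map]
  simp

-- ===== VERDICT (by name: the statement is the Claim_ definition above) =====
theorem get_poses_spec : Claim_equal_get_poses := by
  intro seq primer _
  exact get_poses_eq_alt seq primer
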